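-- pv_equiv track=rewrite | github.com/isha7010/Time-Table-Management-System | app.py | backtrack_schedule
-- ===== SOURCE A (Python) =====
-- from collections import defaultdict
--
-- def backtrack_schedule(lectures, days, slots, faculty_busy, faculty_day_count):
--     placed         = []
--     subject_day    = defaultdict(set)
--     class_slot     = set()
--     fac_busy_local = set()
--     fac_day_local  = defaultdict(int)
--
--     def is_valid(lecture, day, slot):
--         sid = lecture['subject_id']
--         fid = lecture['faculty_id']
--         mxd = lecture['max_hours_per_day']
--         if (day, slot, fid) in faculty_busy:                                        return False
--         if (day, slot, fid) in fac_busy_local:                                      return False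
--         if (day, slot) in class_slot:                                               return False
--         if day in subject_day[sid]:                                                 return False
--         if faculty_day_count[(fid, day)] + fac_day_local[(fid, day)] >= mxd:       return False
--         return True
--
--     def place(idx):
--         if idx == len(lectures):
--             return True
--         lecture = lectures[idx]
--         sid = lecture['subject_id']
--         fid = lecture['faculty_id']
--         for day in days:
--             for slot in slots:
--                 if not is_valid(lecture, day, slot):
--                     continue
--                 placed.append({'subject_id': sid, 'faculty_id': fid, 'day': day, 'slot_id': slot})
--                 subject_day[sid].add(day)
--                 class_slot.add((day, slot))
--                 fac_busy_local.add((day, slot, fid))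
--                 fac_day_local[(fid, day)] += 1
--                 if place(idx + 1):
--                     return True
--                 placed.pop()
--                 subject_day[sid].discard(day)
--                 class_slot.discard((day, slot))
--                 fac_busy_local.discard((day, slot, fid))
--                 fac_day_local[(fid, day)] -= 1
--         return False
--
--     return (placed if place(0) else None), "Backtracking CSP"
-- ===== SOURCE B (Python) =====
-- def backtrack_schedule(lectures, days, slots, faculty_busy, faculty_day_count):
--     pairs = [(d, s) for d in days for s in slots]
--
--     def ok(placed, lec, day, slot):
--         fid = lec['faculty_id']
--         if (day, slot, fid) in faculty_busy:
--             return False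
--         used = 0
--         for p in placed:
--             if p['day'] == day and (p['slot_id'] == slot or p['subject_id'] == lec['subject_id']):
--                 return False
--             if p['faculty_id'] == fid and p['day'] == day:
--                 used += 1
--         return faculty_day_count[(fid, day)] + used < lec['max_hours_per_day']
--
--     def solve(remaining, placed):
--         if not remaining:
--             return placed
--         lec = remaining[0]
--         for day, slot in pairs:
--             if ok(placed, lec, day, slot):
--                 res = solve(remaining[1:], placed + [{
--                     'subject_id': lec['subject_id'],
--                     'faculty_id': lec['faculty_id'],
--                     'day': day,
--                     'slot_id': slot}])
--                 if res is not None: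
--                     return res
--         return None
--
--     return solve(lectures, []), "Backtracking CSP"
-- ===== Notes on version B (the rewrite author's own statement) =====
-- stated objective: simpler
-- what changed: B drops A's five incrementally-maintained-and-undone index structures (subject_day, class_slot, fac_busy_local, fac_day_local, mutated placed) and instead recurses purely functionally over the remaining lectures with only the immutable placed list, checking every constraint by a single scan of placed. Pre_ excludes inputs where A's dict lookups can raise KeyError (a lecture missing one of the three keys, or faculty_day_count missing a reachable (faculty_id, day) key); on the rare such inputs where the lookup is short-circuited away and A still returns, B returns the same value anyway.
import Mathlib
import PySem

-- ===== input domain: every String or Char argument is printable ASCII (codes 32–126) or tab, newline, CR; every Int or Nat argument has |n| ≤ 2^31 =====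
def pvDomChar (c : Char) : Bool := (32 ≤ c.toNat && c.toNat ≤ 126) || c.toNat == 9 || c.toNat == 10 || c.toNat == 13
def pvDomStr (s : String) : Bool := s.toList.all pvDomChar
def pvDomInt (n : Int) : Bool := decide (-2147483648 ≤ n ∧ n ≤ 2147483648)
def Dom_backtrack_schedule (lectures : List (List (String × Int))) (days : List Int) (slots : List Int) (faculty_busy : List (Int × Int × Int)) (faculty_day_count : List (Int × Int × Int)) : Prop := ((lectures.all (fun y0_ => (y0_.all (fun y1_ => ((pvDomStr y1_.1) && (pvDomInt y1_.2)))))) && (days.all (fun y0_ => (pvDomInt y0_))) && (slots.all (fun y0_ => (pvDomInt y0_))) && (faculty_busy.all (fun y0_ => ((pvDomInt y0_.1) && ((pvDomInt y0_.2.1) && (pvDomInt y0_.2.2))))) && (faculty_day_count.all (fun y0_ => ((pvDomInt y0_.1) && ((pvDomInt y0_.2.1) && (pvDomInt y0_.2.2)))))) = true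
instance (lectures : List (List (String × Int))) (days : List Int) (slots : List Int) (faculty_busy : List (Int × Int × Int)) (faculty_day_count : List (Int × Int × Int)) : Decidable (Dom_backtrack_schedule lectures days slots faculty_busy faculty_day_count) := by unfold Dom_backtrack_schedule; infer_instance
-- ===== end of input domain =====

-- ===== PORT A =====
-- B replaces A's five incrementally maintained/undone index structures by a purely functional
-- recursion that keeps only the immutable `placed` list and checks constraints by scanning it.

-- lec[k] for the fixed string keys both Pythons use; the default 0 is unreachable under
-- Pre_backtrack_schedule (the Python raises KeyError exactly where find? is none).
def pvField (p : List (String × Int)) (k : String) : Int :=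
  (((p.find? (fun e => e.1 == k)).map (fun e => e.2)).getD 0)

-- faculty_day_count[(fid, day)] : first matching entry; default 0 unreachable under Pre_.
def pvFdcGet (fdc : List (Int × Int × Int)) (fid day : Int) : Int :=
  (((fdc.find? (fun e => e.1 == fid && e.2.1 == day)).map (fun e => e.2.2)).getD 0)

-- the dict A appends to `placed` (and B builds identically)
def pvMkPlaced (sid fid day slot : Int) : List (String × Int) :=
  [("subject_id", sid), ("faculty_id", fid), ("day", day), ("slot_id", slot)]

-- A's five mutable structures, threaded as one value. A mutates them and undoes the exact
-- mutations on backtrack, so functionally the pre-mutation state is reused on failure.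
structure StA where
  placed : List (List (String × Int))
  subject_day : PySem.Dict Int (PySem.Set Int)    -- defaultdict(set); the lookup-created empty sets have no value effect
  class_slot : PySem.Set (Int × Int)
  fac_busy : PySem.Set (Int × Int × Int)
  fac_day : PySem.Dict (Int × Int) Int            -- defaultdict(int)
deriving Repr

-- is_valid, checks in A's order
def isValidA (fb fdc : List (Int × Int × Int)) (st : StA) (lec : List (String × Int))
    (day slot : Int) : Bool :=
  let sid := pvField lec "subject_id"
  let fid := pvField lec "faculty_id"
  let mxd := pvField lec "max_hours_per_day"
  if (day, slot, fid) ∈ fb then false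
  else if (day, slot, fid) ∈ st.fac_busy then false
  else if (day, slot) ∈ st.class_slot then false
  else if day ∈ st.subject_day.getD sid PySem.Set.empty then false
  else if pvFdcGet fdc fid day + st.fac_day.getD (fid, day) 0 ≥ mxd then false
  else true

-- the five mutations performed after a valid choice
def pushA (st : StA) (sid fid day slot : Int) : StA :=
  { placed := st.placed ++ [pvMkPlaced sid fid day slot]
    subject_day := st.subject_day.insert sid ((st.subject_day.getD sid PySem.Set.empty).add day)
    class_slot := st.class_slot.add (day, slot)
    fac_busy := st.fac_busy.add (day, slot, fid)
    fac_day := st.fac_day.insert (fid, day) (st.fac_day.getD (fid, day) 0 + 1) }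

-- place(idx), as structural recursion over the remaining lectures; the two nested for-loops
mutual
def placeA (fb fdc : List (Int × Int × Int)) (days slots : List Int) :
    List (List (String × Int)) → StA → Option StA
  | [], st => some st
  | lec :: rest, st => loopDayA fb fdc days slots lec rest days st
  termination_by l _ => (l.length + 1, 0, 0)

def loopDayA (fb fdc : List (Int × Int × Int)) (days slots : List Int)
    (lec : List (String × Int)) (rest : List (List (String × Int))) :
    List Int → StA → Option StA
  | [], _ => none
  | d :: ds, st =>
    match loopSlotA fb fdc days slots lec rest d slots st with
    | some r => some r
    | none => loopDayA fb fdc days slots lec rest ds st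
  termination_by ds _ => (rest.length + 1, ds.length, 0)

def loopSlotA (fb fdc : List (Int × Int × Int)) (days slots : List Int)
    (lec : List (String × Int)) (rest : List (List (String × Int))) (d : Int) :
    List Int → StA → Option StA
  | [], _ => none
  | s :: ss, st =>
    if isValidA fb fdc st lec d s then
      match placeA fb fdc days slots rest
          (pushA st (pvField lec "subject_id") (pvField lec "faculty_id") d s) with
      | some r => some r
      | none => loopSlotA fb fdc days slots lec rest d ss st
    else loopSlotA fb fdc days slots lec rest d ss st
  termination_by ss _ => (rest.length + 1, 0, ss.length + 1)
end

def backtrack_schedule (lectures : List (List (String × Int))) (days : List Int) (slots : List Int) (faculty_busy : List (Int × Int × Int)) (faculty_day_count : List (Int × Int × Int)) : (Option (List (List (String × Int)))) × String :=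
  match placeA faculty_busy faculty_day_count days slots lectures
      ⟨[], PySem.Dict.empty, PySem.Set.empty, PySem.Set.empty, PySem.Dict.empty⟩ with
  | some st => (some st.placed, "Backtracking CSP")
  | none => (none, "Backtracking CSP")

-- ===== PORT B =====
-- B's scan of `placed` inside ok(): early return None on a conflict, else the running count `used`
def scanB (sid fid day slot : Int) : List (List (String × Int)) → Int → Option Int
  | [], used => some used
  | p :: rest, used =>
    if pvField p "day" == day && (pvField p "slot_id" == slot || pvField p "subject_id" == sid) then
      none
    else
      scanB sid fid day slot rest
        (if pvField p "faculty_id" == fid && pvField p "day" == day then used + 1 else used)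

def okB (fb fdc : List (Int × Int × Int)) (placed : List (List (String × Int)))
    (lec : List (String × Int)) (day slot : Int) : Bool :=
  let fid := pvField lec "faculty_id"
  if (day, slot, fid) ∈ fb then false
  else
    match scanB (pvField lec "subject_id") fid day slot placed 0 with
    | none => false
    | some used => decide (pvFdcGet fdc fid day + used < pvField lec "max_hours_per_day")

-- pairs = [(d, s) for d in days for s in slots]
def pvPairs (days slots : List Int) : List (Int × Int) :=
  days.flatMap (fun d => slots.map (fun s => (d, s)))

mutual
def solveB (fb fdc : List (Int × Int × Int)) (pairs : List (Int × Int)) :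
    List (List (String × Int)) → List (List (String × Int)) →
    Option (List (List (String × Int)))
  | [], placed => some placed
  | lec :: rest, placed => loopB fb fdc pairs lec rest pairs placed
  termination_by l _ => (l.length + 1, 0)

def loopB (fb fdc : List (Int × Int × Int)) (pairs : List (Int × Int))
    (lec : List (String × Int)) (rest : List (List (String × Int))) :
    List (Int × Int) → List (List (String × Int)) →
    Option (List (List (String × Int)))
  | [], _ => none
  | (d, s) :: ps, placed =>
    if okB fb fdc placed lec d s then
      match solveB fb fdc pairs rest
          (placed ++ [pvMkPlaced (pvField lec "subject_id") (pvField lec "faculty_id") d s]) with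
      | some r => some r
      | none => loopB fb fdc pairs lec rest ps placed
    else loopB fb fdc pairs lec rest ps placed
  termination_by ps _ => (rest.length + 1, ps.length + 1)
end

def backtrack_schedule_alt (lectures : List (List (String × Int))) (days : List Int) (slots : List Int) (faculty_busy : List (Int × Int × Int)) (faculty_day_count : List (Int × Int × Int)) : (Option (List (List (String × Int)))) × String :=
  match solveB faculty_busy faculty_day_count (pvPairs days slots) lectures [] with
  | some p => (some p, "Backtracking CSP")
  | none => (none, "Backtracking CSP")

-- ===== PRECONDITION & SPEC =====
-- Pre_ excludes the inputs where the Python A's dict lookups can raise KeyError: a lecture missing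
-- one of the keys 'subject_id'/'faculty_id'/'max_hours_per_day', or faculty_day_count missing a
-- (faculty_id, day) key for some lecture and day; on the rare such inputs where every lookup is
-- short-circuited away and A still returns, the excluded B returns the same value anyway.
def Pre_backtrack_schedule (lectures : List (List (String × Int))) (days : List Int) (slots : List Int) (faculty_busy : List (Int × Int × Int)) (faculty_day_count : List (Int × Int × Int)) : Prop :=
  (∀ lec ∈ lectures, (∃ e ∈ lec, e.1 = "subject_id") ∧ (∃ e ∈ lec, e.1 = "faculty_id") ∧
      (∃ e ∈ lec, e.1 = "max_hours_per_day")) ∧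
  (∀ lec ∈ lectures, ∀ d ∈ days,
      ∃ e ∈ faculty_day_count, e.1 = pvField lec "faculty_id" ∧ e.2.1 = d)
instance (lectures : List (List (String × Int))) (days : List Int) (slots : List Int) (faculty_busy : List (Int × Int × Int)) (faculty_day_count : List (Int × Int × Int)) : Decidable (Pre_backtrack_schedule lectures days slots faculty_busy faculty_day_count) := by unfold Pre_backtrack_schedule; infer_instance

def pvWitness_backtrack_schedule : (List (List (String × Int))) × List Int × List Int × (List (Int × Int × Int)) × (List (Int × Int × Int)) :=
  ([[("subject_id", 1), ("faculty_id", 2), ("max_hours_per_day", 3)]], [0], [0], [], [(2, 0, 0)])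

def Spec_backtrack_schedule (lectures : List (List (String × Int))) (days : List Int) (slots : List Int) (faculty_busy : List (Int × Int × Int)) (faculty_day_count : List (Int × Int × Int)) (out : (Option (List (List (String × Int)))) × String) : Prop := out = backtrack_schedule_alt lectures days slots faculty_busy faculty_day_count
instance (lectures : List (List (String × Int))) (days : List Int) (slots : List Int) (faculty_busy : List (Int × Int × Int)) (faculty_day_count : List (Int × Int × Int)) (out : (Option (List (List (String × Int)))) × String) : Decidable (Spec_backtrack_schedule lectures days slots faculty_busy faculty_day_count out) := by unfold Spec_backtrack_schedule; infer_instance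

-- ===== CLAIM (what is proved, stated in full; the proofs are below) =====
def Claim_equal_backtrack_schedule : Prop := ∀ (lectures : List (List (String × Int))) (days : List Int) (slots : List Int) (faculty_busy : List (Int × Int × Int)) (faculty_day_count : List (Int × Int × Int)), Dom_backtrack_schedule lectures days slots faculty_busy faculty_day_count → Pre_backtrack_schedule lectures days slots faculty_busy faculty_day_count → Spec_backtrack_schedule lectures days slots faculty_busy faculty_day_count (backtrack_schedule lectures days slots faculty_busy faculty_day_count)

-- ===== LEMMAS AND PROOFS =====
theorem pvWitness_ok :
    Dom_backtrack_schedule pvWitness_backtrack_schedule.1 pvWitness_backtrack_schedule.2.1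
      pvWitness_backtrack_schedule.2.2.1 pvWitness_backtrack_schedule.2.2.2.1
      pvWitness_backtrack_schedule.2.2.2.2 ∧
    Pre_backtrack_schedule pvWitness_backtrack_schedule.1 pvWitness_backtrack_schedule.2.1
      pvWitness_backtrack_schedule.2.2.1 pvWitness_backtrack_schedule.2.2.2.1
      pvWitness_backtrack_schedule.2.2.2.2 := by decide

-- A's maintained structures agree with recomputation from `placed` (B's view of the state)
def InvA (st : StA) : Prop :=
  (∀ sid d, d ∈ st.subject_day.getD sid PySem.Set.empty ↔
      ∃ p ∈ st.placed, pvField p "subject_id" = sid ∧ pvField p "day" = d) ∧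
  (∀ d s, (d, s) ∈ st.class_slot ↔
      ∃ p ∈ st.placed, pvField p "day" = d ∧ pvField p "slot_id" = s) ∧
  (∀ d s f, (d, s, f) ∈ st.fac_busy ↔
      ∃ p ∈ st.placed, pvField p "day" = d ∧ pvField p "slot_id" = s ∧
        pvField p "faculty_id" = f) ∧
  (∀ f d, st.fac_day.getD (f, d) 0 =
      (st.placed.countP (fun p => pvField p "faculty_id" == f && pvField p "day" == d) : Int))

@[simp] lemma pvField_mk_sid (sid fid day slot : Int) :
    pvField (pvMkPlaced sid fid day slot) "subject_id" = sid := rfl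
@[simp] lemma pvField_mk_fid (sid fid day slot : Int) :
    pvField (pvMkPlaced sid fid day slot) "faculty_id" = fid := rfl
@[simp] lemma pvField_mk_day (sid fid day slot : Int) :
    pvField (pvMkPlaced sid fid day slot) "day" = day := rfl
@[simp] lemma pvField_mk_slot (sid fid day slot : Int) :
    pvField (pvMkPlaced sid fid day slot) "slot_id" = slot := rfl

lemma InvA_init : InvA ⟨[], PySem.Dict.empty, PySem.Set.empty, PySem.Set.empty, PySem.Dict.empty⟩ := by
  refine ⟨?_, ?_, ?_, ?_⟩ <;> intros <;>
    simp [PySem.Dict.getD_empty, PySem.Set.empty]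

lemma InvA_push (st : StA) (sid fid d s : Int) (h : InvA st) :
    InvA (pushA st sid fid d s) := by
  obtain ⟨h1, h2, h3, h4⟩ := h
  simp only [PySem.Set.empty] at h1
  refine ⟨?_, ?_, ?_, ?_⟩
  · intro sid' d'
    simp only [pushA, PySem.Dict.getD_insert]
    by_cases hs : sid' = sid
    · subst hs
      simp [PySem.Set.mem_add, h1 sid' d', List.mem_append, or_and_right, exists_or, eq_comm]
    · simp [hs, h1 sid' d', List.mem_append, or_and_right, exists_or, eq_comm]
  · intro d' s'
    simp only [pushA]
    simp [PySem.Set.mem_add, h2 d' s', List.mem_append, Prod.ext_iff, or_and_right,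
      exists_or, eq_comm]
  · intro d' s' f'
    simp only [pushA]
    simp [PySem.Set.mem_add, h3 d' s' f', List.mem_append, Prod.ext_iff, or_and_right,
      exists_or, eq_comm]
  · intro f' d'
    simp only [pushA, PySem.Dict.getD_insert, List.countP_append, List.countP_cons,
      List.countP_nil]
    by_cases hfd : (f', d') = (fid, d)
    · obtain ⟨hf, hd⟩ := Prod.mk.injEq .. ▸ hfd
      simp_all
    · have : ¬ (fid = f' ∧ d = d') := by
        intro ⟨a, b⟩; exact hfd (by simp [a.symm, b.symm])
      simp [hfd, h4 f' d', this]

lemma scanB_spec (sid fid day slot : Int) : ∀ (l : List (List (String × Int))) (used : Int),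
    scanB sid fid day slot l used =
      if l.any (fun p => pvField p "day" == day &&
          (pvField p "slot_id" == slot || pvField p "subject_id" == sid)) then none
      else some (used +
        (l.countP (fun p => pvField p "faculty_id" == fid && pvField p "day" == day) : Int)) := by
  intro l
  induction l with
  | nil => intro used; simp [scanB]
  | cons p rest ih =>
    intro used
    by_cases hc : (pvField p "day" == day &&
        (pvField p "slot_id" == slot || pvField p "subject_id" == sid)) = true
    · simp [scanB, hc]
    · by_cases hf : (pvField p "faculty_id" == fid && pvField p "day" == day) = true
      · simp [scanB, hc, hf, ih]
        ring_nf
      · simp [scanB, hc, hf, ih]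

lemma ok_eq (fb fdc : List (Int × Int × Int)) (st : StA) (h : InvA st)
    (lec : List (String × Int)) (d s : Int) :
    isValidA fb fdc st lec d s = okB fb fdc st.placed lec d s := by
  obtain ⟨h1, h2, h3, h4⟩ := h
  simp only [PySem.Set.empty] at h1
  unfold isValidA okB
  simp only [PySem.Set.empty]
  by_cases hfb : (d, s, pvField lec "faculty_id") ∈ fb
  · simp [hfb]
  · rw [scanB_spec]
    by_cases hany : (st.placed.any (fun p => pvField p "day" == d &&
        (pvField p "slot_id" == s || pvField p "subject_id" == pvField lec "subject_id"))) = true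
    · -- a conflict exists in placed: A rejects via fac_busy/class_slot/subject_day, B via the scan
      have hany' := hany
      rw [List.any_eq_true] at hany'
      obtain ⟨p, hp, hcond⟩ := hany'
      simp only [Bool.and_eq_true, Bool.or_eq_true, beq_iff_eq] at hcond
      obtain ⟨hday, hrest⟩ := hcond
      rcases hrest with hslot | hsid
      · have hcs : (d, s) ∈ st.class_slot := (h2 d s).mpr ⟨p, hp, hday, hslot⟩
        by_cases hfbl : (d, s, pvField lec "faculty_id") ∈ st.fac_busy <;>
          simp [hfb, hany, hfbl, hcs]
      · have hsd : d ∈ st.subject_day.getD (pvField lec "subject_id") ([] : PySem.Set Int) :=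
          (h1 _ d).mpr ⟨p, hp, hsid, hday⟩
        by_cases hfbl : (d, s, pvField lec "faculty_id") ∈ st.fac_busy
        · simp [hfb, hany, hfbl]
        · by_cases hcs : (d, s) ∈ st.class_slot <;> simp [hfb, hany, hfbl, hcs, hsd]
    · -- no conflict: A's three local-structure checks all fail and the counts coincide
      have hnot : ∀ p ∈ st.placed, ¬(pvField p "day" = d ∧
          (pvField p "slot_id" = s ∨ pvField p "subject_id" = pvField lec "subject_id")) := by
        intro p hp hcontra
        rw [List.any_eq_true] at hany
        refine hany ⟨p, hp, ?_⟩
        simp only [Bool.and_eq_true, Bool.or_eq_true, beq_iff_eq]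
        exact ⟨hcontra.1, hcontra.2⟩
      have hfbl : ¬ (d, s, pvField lec "faculty_id") ∈ st.fac_busy := by
        intro hmem
        obtain ⟨p, hp, a, b, c⟩ := (h3 d s _).mp hmem
        exact hnot p hp ⟨a, Or.inl b⟩
      have hcs : ¬ (d, s) ∈ st.class_slot := by
        intro hmem
        obtain ⟨p, hp, a, b⟩ := (h2 d s).mp hmem
        exact hnot p hp ⟨a, Or.inl b⟩
      have hsd : ¬ d ∈ st.subject_day.getD (pvField lec "subject_id") ([] : PySem.Set Int) := by
        intro hmem
        obtain ⟨p, hp, a, b⟩ := (h1 _ d).mp hmem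
        exact hnot p hp ⟨b, Or.inr a⟩
      rw [h4 (pvField lec "faculty_id") d]
      by_cases hge : pvField lec "max_hours_per_day" ≤
          pvFdcGet fdc (pvField lec "faculty_id") d +
            (st.placed.countP (fun p => pvField p "faculty_id" == pvField lec "faculty_id" &&
              pvField p "day" == d) : Int)
      · simp [hfb, hany, hfbl, hcs, hsd, hge]
      · simp [hfb, hany, hfbl, hcs, hsd, hge]
        omega

-- the continuation form of "match … with | some r => some r.placed | none => k"
def contA (x : Option StA) (k : Option (List (List (String × Int)))) :
    Option (List (List (String × Int))) :=
  match x with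
  | some r => some r.placed
  | none => k

lemma main_eq (fb fdc : List (Int × Int × Int)) (days slots : List Int) :
    ∀ (lecs : List (List (String × Int))) (st : StA), InvA st →
      Option.map StA.placed (placeA fb fdc days slots lecs st) =
        solveB fb fdc (pvPairs days slots) lecs st.placed := by
  intro lecs
  induction lecs with
  | nil => intro st _; simp [placeA, solveB]
  | cons lec rest ih =>
    have slotLemma : ∀ (d : Int) (ss : List Int) (tail : List (Int × Int)) (st : StA), InvA st →
        contA (loopSlotA fb fdc days slots lec rest d ss st)
            (loopB fb fdc (pvPairs days slots) lec rest tail st.placed) =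
          loopB fb fdc (pvPairs days slots) lec rest
            (ss.map (fun s => (d, s)) ++ tail) st.placed := by
      intro d ss
      induction ss with
      | nil => intro tail st _; simp [loopSlotA, contA]
      | cons s ss ihs =>
        intro tail st hst
        rw [show (s :: ss).map (fun s => (d, s)) ++ tail =
          (d, s) :: (ss.map (fun s => (d, s)) ++ tail) from rfl]
        rw [loopSlotA, loopB]
        rw [← ok_eq fb fdc st hst lec d s]
        by_cases hv : isValidA fb fdc st lec d s
        · simp only [hv, if_true]
          have hpush := InvA_push st (pvField lec "subject_id") (pvField lec "faculty_id") d s hst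
          have heq := ih _ hpush
          have hplaced : (pushA st (pvField lec "subject_id") (pvField lec "faculty_id") d s).placed
              = st.placed ++ [pvMkPlaced (pvField lec "subject_id") (pvField lec "faculty_id") d s] := rfl
          rw [hplaced] at heq
          cases hres : placeA fb fdc days slots rest
              (pushA st (pvField lec "subject_id") (pvField lec "faculty_id") d s) with
          | some r =>
            rw [hres] at heq
            simp only [Option.map_some] at heq
            simp [contA, ← heq]
          | none =>
            rw [hres] at heq
            simp only [Option.map_none] at heq
            simp only [← heq]
            exact ihs tail st hst
        · simp only [hv]
          exact ihs tail st hst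
    have dayLemma : ∀ (ds : List Int) (st : StA), InvA st →
        Option.map StA.placed (loopDayA fb fdc days slots lec rest ds st) =
          loopB fb fdc (pvPairs days slots) lec rest (pvPairs ds slots) st.placed := by
      intro ds
      induction ds with
      | nil => intro st _; simp [loopDayA, loopB, pvPairs]
      | cons d ds ihd =>
        intro st hst
        have hsplit : pvPairs (d :: ds) slots =
            slots.map (fun s => (d, s)) ++ pvPairs ds slots := by
          simp [pvPairs]
        rw [hsplit, ← slotLemma d slots (pvPairs ds slots) st hst, loopDayA]
        cases hres : loopSlotA fb fdc days slots lec rest d slots st with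
        | some r => simp [contA]
        | none => simp only [contA]; exact ihd st hst
    intro st hst
    rw [placeA, solveB]
    exact dayLemma days st hst

-- ===== VERDICT (by name: the statement is the Claim_ definition above) =====
theorem backtrack_schedule_spec : Claim_equal_backtrack_schedule := by
  intro lectures days slots faculty_busy faculty_day_count _ _
  unfold Spec_backtrack_schedule backtrack_schedule backtrack_schedule_alt
  have h := main_eq faculty_busy faculty_day_count days slots lectures
    ⟨[], PySem.Dict.empty, PySem.Set.empty, PySem.Set.empty, PySem.Dict.empty⟩ InvA_init
  cases hres : placeA faculty_busy faculty_day_count days slots lectures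
      ⟨[], PySem.Dict.empty, PySem.Set.empty, PySem.Set.empty, PySem.Dict.empty⟩ with
  | some st => rw [hres] at h; simp only [Option.map_some] at h; rw [← h]
  | none => rw [hres] at h; simp only [Option.map_none] at h; rw [← h]
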